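-- pv_equiv track=rewrite | github.com/Luizefz/flyfood | possible_path.py | generate_paths_possibles
-- ===== SOURCE A (Python) =====
-- from itertools import permutations
--
-- def generate_paths_possibles(pairs_list=dict):
--     permute_list=[]                          # Gera uma lista com todas as permutacoes possiveis
--     key_list = pairs_list.keys()
--
--     for i in key_list:
--         if i != 'R':                         # Adiciona na lista todas as chave que nao sao 'R'
--             permute_list.append(i)
--
--     permutation = ['R' + ''.join(i) + 'R' for i in permutations(permute_list)] # Gera todas as permutacoes possiveis e adiciona 'R' no inicio e no fim
--
--     return permutation
-- ===== SOURCE B (Python) =====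
-- def generate_paths_possibles(pairs_list=dict):
--     # Different decomposition: recursive selection with a string prefix accumulator,
--     # emitting each finished path directly (no intermediate tuples, no join per permutation).
--     keys = [k for k in pairs_list if k != 'R']
--     out = []
--
--     def build(prefix, remaining):
--         if not remaining:
--             out.append('R' + prefix + 'R')
--         else:
--             for idx in range(len(remaining)):
--                 build(prefix + remaining[idx], remaining[:idx] + remaining[idx + 1:])
--
--     build('', keys)
--     return out
-- ===== Notes on version B (the rewrite author's own statement) =====
-- stated objective: alternative
-- what changed: Replaced itertools.permutations plus a join-per-tuple comprehension by a recursive selection generator that carries a string prefix accumulator and emits each finished 'R...R' path directly, with no intermediate permutation tuples.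
import Mathlib
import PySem

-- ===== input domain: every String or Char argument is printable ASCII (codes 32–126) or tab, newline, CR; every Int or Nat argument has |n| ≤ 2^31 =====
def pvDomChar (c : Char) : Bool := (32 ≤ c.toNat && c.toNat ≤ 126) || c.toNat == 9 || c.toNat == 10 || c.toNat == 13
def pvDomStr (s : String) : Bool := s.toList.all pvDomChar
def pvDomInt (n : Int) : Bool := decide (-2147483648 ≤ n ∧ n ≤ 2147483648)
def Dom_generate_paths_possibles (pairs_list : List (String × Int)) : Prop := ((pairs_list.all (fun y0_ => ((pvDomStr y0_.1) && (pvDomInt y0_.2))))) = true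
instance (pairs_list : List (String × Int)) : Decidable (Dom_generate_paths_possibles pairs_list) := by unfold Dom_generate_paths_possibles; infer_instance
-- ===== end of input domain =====

-- B replaces itertools.permutations + a join-per-tuple comprehension by a recursive
-- selection generator with a string-prefix accumulator that emits each 'R...R' path
-- directly (objective: alternative decomposition, same asymptotic cost).


-- ===== PORT A =====
def generate_paths_possibles (pairs_list : List (String × Int)) : List String :=
  -- key_list = pairs_list.keys()  (dict: keys in insertion order, first occurrence)
  let key_list := (PySem.Dict.ofList pairs_list).keys
  -- for i in key_list: if i != 'R': permute_list.append(i)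
  let permute_list := key_list.foldl (fun acc i => if i != "R" then acc ++ [i] else acc) []
  -- ['R' + ''.join(i) + 'R' for i in permutations(permute_list)]
  (PySem.List.permutations permute_list permute_list.length).map
    (fun i => "R" ++ PySem.Str.join "" i ++ "R")

-- ===== PORT B =====
-- build(prefix, remaining): emit 'R'+prefix+'R' when nothing remains, else pick each
-- remaining element in order (remaining[:idx]+remaining[idx+1:] = eraseIdx idx).
def pvBuild (pre : String) (remaining : List String) : List String :=
  match remaining with
  | [] => ["R" ++ pre ++ "R"]
  | x :: xs =>
    (List.range (x :: xs).length).attach.flatMap   -- .attach only carries the idx < len bound for termination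
      (fun idx => pvBuild (pre ++ (x :: xs).getD idx.1 "") ((x :: xs).eraseIdx idx.1))
termination_by remaining.length
decreasing_by
  have h := idx.2
  simp only [List.mem_range, List.length_cons, Nat.lt_succ_iff] at h
  simp [List.length_eraseIdx, h]

def generate_paths_possibles_alt (pairs_list : List (String × Int)) : List String :=
  let keys := ((PySem.Dict.ofList pairs_list).keys).filter (fun k => k != "R")
  pvBuild "" keys

-- ===== PRECONDITION & SPEC =====
def Spec_generate_paths_possibles (pairs_list : List (String × Int)) (out : List String) : Prop := out = generate_paths_possibles_alt pairs_list
instance (pairs_list : List (String × Int)) (out : List String) : Decidable (Spec_generate_paths_possibles pairs_list out) := by unfold Spec_generate_paths_possibles; infer_instance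

-- ===== CLAIM (what is proved, stated in full; the proofs are below) =====
def Claim_equal_generate_paths_possibles : Prop := ∀ (pairs_list : List (String × Int)), Dom_generate_paths_possibles pairs_list → Spec_generate_paths_possibles pairs_list (generate_paths_possibles pairs_list)

-- ===== LEMMAS AND PROOFS =====

-- ''.join(x :: p) = x ++ ''.join(p)
lemma join_empty_cons (x : String) (p : List String) :
    PySem.Str.join "" (x :: p) = x ++ PySem.Str.join "" p := by
  apply String.ext
  simp only [PySem.Str.toList_join, String.toList_append, List.map_cons]
  cases p with
  | nil => simp [PySem.Chars.join_singleton, PySem.Chars.join_nil]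
  | cons q rest => simp [PySem.Chars.join_cons_cons]

-- pvBuild with accumulator `pre` equals A's permutation list with `pre` spliced in.
lemma pvBuild_eq_perms (n : Nat) : ∀ (rem : List String) (pre : String), rem.length = n →
    pvBuild pre rem =
      (PySem.List.permutations rem n).map
        (fun p => "R" ++ (pre ++ PySem.Str.join "" p) ++ "R") := by
  induction n with
  | zero =>
    intro rem pre h
    have hr : rem = [] := List.eq_nil_of_length_eq_zero h
    subst hr
    unfold pvBuild
    have hj : PySem.Str.join "" ([] : List String) = "" := rfl
    rw [PySem.List.permutations.eq_1]
    simp [hj]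
  | succ n ih =>
    intro rem pre h
    cases rem with
    | nil => simp at h
    | cons a as =>
      rw [pvBuild.eq_def]
      dsimp only
      have hattach : ((List.range (a :: as).length).attach.flatMap
          (fun idx => pvBuild (pre ++ (a :: as).getD idx.1 "") ((a :: as).eraseIdx idx.1))) =
          (List.range (a :: as).length).flatMap
          (fun idx => pvBuild (pre ++ (a :: as).getD idx "") ((a :: as).eraseIdx idx)) := by
        simp
      rw [hattach, PySem.List.permutations.eq_2, List.map_flatMap]
      apply List.flatMap_congr
      intro i hi
      have hlt : i < (a :: as).length := List.mem_range.mp hi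
      have hget : (a :: as)[i]? = some ((a :: as)[i]) := List.getElem?_eq_getElem hlt
      have hgetD : (a :: as).getD i "" = (a :: as)[i] := by
        simp [List.getD, hget]
      have hle : i ≤ as.length := by
        simpa [Nat.lt_succ_iff] using hlt
      have hn : as.length = n := by simpa using h
      have hlen : ((a :: as).eraseIdx i).length = n := by
        simp [List.length_eraseIdx, hle]
        omega
      rw [hgetD, ih _ _ hlen, hget]
      simp only [List.map_map]
      apply List.map_congr_left
      intro p _
      simp only [Function.comp_apply, join_empty_cons, String.append_assoc]

-- the append-if loop is a filter
lemma permute_list_eq (keys : List String) :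
    keys.foldl (fun acc i => if i != "R" then acc ++ [i] else acc) [] =
      keys.filter (fun k => k != "R") := by
  rw [PySem.List.foldl_append_if (fun i => i != "R") (fun i => i) keys []]
  simp

-- ===== VERDICT (by name: the statement is the Claim_ definition above) =====
theorem generate_paths_possibles_spec : Claim_equal_generate_paths_possibles := by
  intro pairs_list _
  show _ = _
  unfold generate_paths_possibles generate_paths_possibles_alt
  simp only [permute_list_eq]
  rw [pvBuild_eq_perms (((PySem.Dict.ofList pairs_list).keys).filter (fun k => k != "R")).length _ "" rfl]
  apply List.map_congr_left
  intro p _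
  simp
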